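-- pv_equiv track=rewrite | github.com/markohuang/Connect-Five | get_threats.py | check_kernel
-- ===== SOURCE A (Python) =====
-- def check_kernel(kernel_squares, board, col, opp):
--     """Helper to check if the vector is worth digging deeper"""
--     free, rest = [], []
--     for square in kernel_squares:
--         y_ind, x_ind = square
--         if board[y_ind][x_ind] == opp:
--             return free, rest
--         if board[y_ind][x_ind] == col:
--             rest.append(square)
--         else:
--             free.append(square)
--     return free, rest
-- ===== SOURCE B (Python) =====
-- def check_kernel(kernel_squares, board, col, opp):
--     """Find the prefix before the first opponent square, then partition it."""
--     cut = len(kernel_squares)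
--     for i, (y, x) in enumerate(kernel_squares):
--         if board[y][x] == opp:
--             cut = i
--             break
--     prefix = kernel_squares[:cut]
--     rest = [s for s in prefix if board[s[0]][s[1]] == col]
--     free = [s for s in prefix if board[s[0]][s[1]] != col]
--     return free, rest
-- ===== Notes on version B (the rewrite author's own statement) =====
-- stated objective: alternative
-- what changed: Replaced the single interleaved scan with early return by find-the-cutoff-before-the-first-opponent-square followed by two independent partition passes over that prefix.
import Mathlib
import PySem

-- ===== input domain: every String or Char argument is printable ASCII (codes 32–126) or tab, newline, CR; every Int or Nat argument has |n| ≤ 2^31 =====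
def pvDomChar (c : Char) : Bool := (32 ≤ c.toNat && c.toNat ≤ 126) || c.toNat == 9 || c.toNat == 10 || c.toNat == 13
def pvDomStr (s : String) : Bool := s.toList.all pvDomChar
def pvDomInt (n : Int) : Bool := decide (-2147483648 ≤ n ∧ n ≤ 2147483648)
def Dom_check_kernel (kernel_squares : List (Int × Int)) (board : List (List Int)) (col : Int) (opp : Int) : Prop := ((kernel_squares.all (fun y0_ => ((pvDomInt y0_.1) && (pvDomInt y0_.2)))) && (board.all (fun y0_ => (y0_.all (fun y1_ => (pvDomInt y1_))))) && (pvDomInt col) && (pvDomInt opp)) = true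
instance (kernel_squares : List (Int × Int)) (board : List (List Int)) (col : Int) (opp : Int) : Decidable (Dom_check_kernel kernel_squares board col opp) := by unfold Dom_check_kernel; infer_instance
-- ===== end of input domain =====

-- B replaces A's single interleaved scan with early return by a cutoff-then-two-partition-passes decomposition (objective: alternative, same cost).

-- board[y][x] as Python evaluates it (negative indices wrap, out of range = IndexError = none)
def pvCellO (board : List (List Int)) (s : Int × Int) : Option Int :=
  (PySem.List.pyGet? board s.1).bind (fun row => PySem.List.pyGet? row s.2)

-- total version used by both ports; Pre_check_kernel guarantees the default is never taken on accessed squares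
def pvCell (board : List (List Int)) (s : Int × Int) : Int := (pvCellO board s).getD 0

-- ===== PORT A =====
def checkKernelGo (board : List (List Int)) (col : Int) (opp : Int) :
    List (Int × Int) → List (Int × Int) → List (Int × Int) → (List (Int × Int)) × (List (Int × Int))
  | [], free, rest => (free, rest)
  | square :: t, free, rest =>
      if pvCell board square == opp then (free, rest)
      else if pvCell board square == col then checkKernelGo board col opp t free (rest ++ [square])
      else checkKernelGo board col opp t (free ++ [square]) rest

def check_kernel (kernel_squares : List (Int × Int)) (board : List (List Int)) (col : Int) (opp : Int) : (List (Int × Int)) × (List (Int × Int)) :=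
  checkKernelGo board col opp kernel_squares [] []

-- ===== PORT B =====
def check_kernel_alt (kernel_squares : List (Int × Int)) (board : List (List Int)) (col : Int) (opp : Int) : (List (Int × Int)) × (List (Int × Int)) :=
  let kept := kernel_squares.takeWhile (fun s => !(pvCell board s == opp))
  (kept.filter (fun s => !(pvCell board s == col)), kept.filter (fun s => pvCell board s == col))

-- ===== PRECONDITION & SPEC =====
-- Pre_ excludes exactly the inputs where Python A raises an IndexError: some square that the
-- scan actually reaches (i.e. before the first opponent square) is out of the board's range.
def Pre_check_kernel (kernel_squares : List (Int × Int)) (board : List (List Int)) (col : Int) (opp : Int) : Prop :=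
  ∀ s ∈ kernel_squares.takeWhile (fun s => !(pvCellO board s == some opp)), (pvCellO board s).isSome = true
instance (kernel_squares : List (Int × Int)) (board : List (List Int)) (col : Int) (opp : Int) : Decidable (Pre_check_kernel kernel_squares board col opp) := by unfold Pre_check_kernel; infer_instance

def pvWitness_check_kernel : (List (Int × Int)) × List (List Int) × Int × Int :=
  ([((0 : Int), (0 : Int)), ((0 : Int), (-1 : Int))], [[(1 : Int), (0 : Int)]], 1, 2)

def Spec_check_kernel (kernel_squares : List (Int × Int)) (board : List (List Int)) (col : Int) (opp : Int) (out : (List (Int × Int)) × (List (Int × Int))) : Prop := out = check_kernel_alt kernel_squares board col opp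
instance (kernel_squares : List (Int × Int)) (board : List (List Int)) (col : Int) (opp : Int) (out : (List (Int × Int)) × (List (Int × Int))) : Decidable (Spec_check_kernel kernel_squares board col opp out) := by unfold Spec_check_kernel; infer_instance

-- ===== CLAIM (what is proved, stated in full; the proofs are below) =====
def Claim_equal_check_kernel : Prop := ∀ (kernel_squares : List (Int × Int)) (board : List (List Int)) (col : Int) (opp : Int), Dom_check_kernel kernel_squares board col opp → Pre_check_kernel kernel_squares board col opp → Spec_check_kernel kernel_squares board col opp (check_kernel kernel_squares board col opp)

-- ===== LEMMAS AND PROOFS =====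

-- the accumulators of A's loop are prefixes of the final answer
theorem checkKernelGo_acc (board : List (List Int)) (col opp : Int) (t : List (Int × Int)) :
    ∀ free rest, checkKernelGo board col opp t free rest =
      (free ++ (checkKernelGo board col opp t [] []).1, rest ++ (checkKernelGo board col opp t [] []).2) := by
  induction t with
  | nil => intro free rest; simp [checkKernelGo]
  | cons sq t ih =>
    intro free rest
    by_cases h1 : pvCell board sq == opp
    · simp [checkKernelGo, h1]
    · by_cases h2 : pvCell board sq == col
      · simp only [checkKernelGo, h1, h2, Bool.false_eq_true, if_false, if_true]
        rw [ih [] ([] ++ [sq]), ih free (rest ++ [sq])]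
        simp
      · simp only [checkKernelGo, h1, h2, Bool.false_eq_true, if_false, if_true]
        rw [ih ([] ++ [sq]) [], ih (free ++ [sq]) rest]
        simp

theorem checkKernelGo_eq_alt (board : List (List Int)) (col opp : Int) (t : List (Int × Int)) :
    checkKernelGo board col opp t [] [] = check_kernel_alt t board col opp := by
  induction t with
  | nil => simp [checkKernelGo, check_kernel_alt]
  | cons sq t ih =>
    by_cases h1 : pvCell board sq == opp
    · simp [checkKernelGo, check_kernel_alt, h1]
    · by_cases h2 : pvCell board sq == col
      · simp only [checkKernelGo, h1, h2, Bool.false_eq_true, if_false, if_true]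
        rw [checkKernelGo_acc, ih]
        simp [check_kernel_alt, List.takeWhile, h1, h2]
      · simp only [checkKernelGo, h1, h2, Bool.false_eq_true, if_false, if_true]
        rw [checkKernelGo_acc, ih]
        simp [check_kernel_alt, List.takeWhile, h1, h2]

-- ===== VERDICT (by name: the statement is the Claim_ definition above) =====
theorem check_kernel_spec : Claim_equal_check_kernel := by
  intro kernel_squares board col opp _ _
  unfold Spec_check_kernel check_kernel
  exact checkKernelGo_eq_alt board col opp kernel_squares
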